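-- pv_equiv track=rewrite | github.com/vladafon/Archivator | laba 2.py | MTF_decompression
-- ===== SOURCE A (Python) =====
-- def MTF_decompression(text):
--     letters = ['0','1','2','3','4','5','6','7','8','9','^',',']
--
--     decomp_string = ''
--
--     for char in text:
--         mtf = 0
--         if char == 'A':
--             mtf = 10
--         elif char == 'B':
--             mtf = 11
--         else:
--             mtf = int(char)
--         decomp_string += letters[mtf]
--         letters = letters[mtf:]+letters[:mtf] # сдвигаем массив
--     return decomp_string
-- ===== SOURCE B (Python) =====
-- def MTF_decompression(text):
--     letters = ['0','1','2','3','4','5','6','7','8','9','^',',']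
--     out = []
--     off = 0
--     for char in text:
--         if char == 'A':
--             mtf = 10
--         elif char == 'B':
--             mtf = 11
--         else:
--             mtf = int(char)
--         off = (off + mtf) % 12
--         out.append(letters[off])
--     return ''.join(out)
-- ===== Notes on version B (the rewrite author's own statement) =====
-- stated objective: alternative
-- what changed: B keeps the 12-letter alphabet immutable and maintains a single integer offset updated by modular arithmetic (state = one int), replacing A's per-character list slicing/rotation (state = a rotated list) and repeated string concatenation with a joined output list.
import Mathlib
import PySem

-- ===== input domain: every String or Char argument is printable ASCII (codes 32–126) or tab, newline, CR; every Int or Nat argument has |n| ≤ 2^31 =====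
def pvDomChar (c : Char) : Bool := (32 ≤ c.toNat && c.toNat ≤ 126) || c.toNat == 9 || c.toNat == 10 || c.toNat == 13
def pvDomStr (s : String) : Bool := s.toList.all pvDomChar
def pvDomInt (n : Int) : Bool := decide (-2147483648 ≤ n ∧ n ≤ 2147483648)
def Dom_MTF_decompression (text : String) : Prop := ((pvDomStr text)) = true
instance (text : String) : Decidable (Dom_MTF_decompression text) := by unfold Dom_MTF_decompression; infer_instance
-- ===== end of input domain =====

-- B replaces A's per-character list rotation (slice+concat) by a constant table and a single
-- modular integer offset (alternative state representation; same asymptotic cost).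

-- ===== PORT A =====
-- the fixed initial alphabet (the literal in both Pythons)
def pvLetters : List Char := ['0', '1', '2', '3', '4', '5', '6', '7', '8', '9', '^', ',']

-- the decode branch, verbatim in A and B: 'A'→10, 'B'→11, else int(char)
-- (int(char) raises ValueError on other non-digit chars; those inputs are outside Pre_,
-- here the port defaults to 0)
def pvMtf (c : Char) : Int :=
  if c = 'A' then 10 else if c = 'B' then 11 else (PySem.Int.ofStr? (String.ofList [c])).getD 0

-- A's loop: state = the rotated letters list and the accumulated string
-- (letters[mtf] cannot raise IndexError inside Pre_; the port defaults to ' ')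
def pvLoopA : List Char → List Char → String → String
  | _, [], acc => acc
  | letters, c :: rest, acc =>
    let mtf := pvMtf c
    pvLoopA (PySem.List.slice letters (some mtf) none ++ PySem.List.slice letters none (some mtf))
      rest (acc.push (PySem.List.pyGetD letters mtf ' '))

def MTF_decompression (text : String) : String :=
  pvLoopA pvLetters text.toList ""

-- ===== PORT B =====
-- B's loop: state = a single integer offset; output collected as a list, joined at the end
def pvLoopB : Int → List Char → List Char → List Char
  | _, [], out => out
  | off, c :: rest, out =>
    let mtf := pvMtf c
    let off' := PySem.Int.mod (off + mtf) 12
    pvLoopB off' rest (out ++ [PySem.List.pyGetD pvLetters off' ' '])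

def MTF_decompression_alt (text : String) : String :=
  String.ofList (pvLoopB 0 text.toList [])

-- ===== PRECONDITION & SPEC =====
def pvValid : List Char := ['0', '1', '2', '3', '4', '5', '6', '7', '8', '9', 'A', 'B']

-- excludes exactly the inputs on which A (and B alike) raises ValueError in int(char)
def Pre_MTF_decompression (text : String) : Prop := text.toList.all (fun c => c ∈ pvValid) = true
instance (text : String) : Decidable (Pre_MTF_decompression text) := by
  unfold Pre_MTF_decompression; infer_instance

def pvWitness_MTF_decompression : String := "A305B"

def Spec_MTF_decompression (text : String) (out : String) : Prop := out = MTF_decompression_alt text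
instance (text : String) (out : String) : Decidable (Spec_MTF_decompression text out) := by
  unfold Spec_MTF_decompression; infer_instance

-- ===== CLAIM (what is proved, stated in full; the proofs are below) =====
def Claim_equal_MTF_decompression : Prop := ∀ (text : String), Dom_MTF_decompression text → Pre_MTF_decompression text → Spec_MTF_decompression text (MTF_decompression text)

-- ===== LEMMAS AND PROOFS =====

-- the alphabet rotated by off: what A's letters list is after total shift off
def pvRot (off : Nat) : List Char := pvLetters.drop off ++ pvLetters.take off

theorem pvPush (l : List Char) (c : Char) :
    (String.ofList l).push c = String.ofList (l ++ [c]) := by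
  apply String.toList_injective; simp

-- all per-step facts, over the finitely many (offset, valid char) pairs
theorem pvStepFactsFin : ∀ (off : Fin 12), ∀ c ∈ pvValid,
    (PySem.List.slice (pvRot off.val) (some (pvMtf c)) none ++
       PySem.List.slice (pvRot off.val) none (some (pvMtf c)) =
      pvRot (PySem.Int.mod ((off.val : Int) + pvMtf c) 12).toNat) ∧
    (PySem.List.pyGetD (pvRot off.val) (pvMtf c) ' ' =
      PySem.List.pyGetD pvLetters (PySem.Int.mod ((off.val : Int) + pvMtf c) 12) ' ') ∧
    (PySem.Int.mod ((off.val : Int) + pvMtf c) 12).toNat < 12 ∧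
    (((PySem.Int.mod ((off.val : Int) + pvMtf c) 12).toNat : Int) =
      PySem.Int.mod ((off.val : Int) + pvMtf c) 12) := by
  intro off c hc
  fin_cases hc <;> fin_cases off <;> decide

theorem pvLoop_eq : ∀ (cs : List Char), (∀ c ∈ cs, c ∈ pvValid) →
    ∀ (off : Nat), off < 12 → ∀ (l : List Char),
    pvLoopA (pvRot off) cs (String.ofList l) = String.ofList (pvLoopB (off : Int) cs l) := by
  intro cs
  induction cs with
  | nil => intro _ off _ l; simp [pvLoopA, pvLoopB]
  | cons c rest ih =>
    intro h off hoff l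
    have hc : c ∈ pvValid := h c (List.mem_cons_self ..)
    have hrest : ∀ x ∈ rest, x ∈ pvValid := fun x hx => h x (List.mem_cons_of_mem _ hx)
    obtain ⟨h1, h2, h3, h4⟩ := pvStepFactsFin ⟨off, hoff⟩ c hc
    simp only [pvLoopA, pvLoopB]
    rw [show ((⟨off, hoff⟩ : Fin 12).val) = off from rfl] at h1 h2 h3 h4
    rw [h1, h2, pvPush, ← h4]
    exact ih hrest _ h3 _

-- ===== VERDICT (by name: the statement is the Claim_ definition above) =====
theorem MTF_decompression_spec : Claim_equal_MTF_decompression := by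
  unfold Claim_equal_MTF_decompression
  intro text _ hpre
  have hpre' : ∀ c ∈ text.toList, c ∈ pvValid := by
    simpa [Pre_MTF_decompression, List.all_eq_true] using hpre
  unfold Spec_MTF_decompression MTF_decompression MTF_decompression_alt
  have := pvLoop_eq text.toList hpre' 0 (by omega) []
  simpa [pvRot, pvLetters] using this
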